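-- pv_equiv track=rewrite | github.com/mohammadbaghershahmir/Automations_Project_Pileh | content_automation_project/stage_e_processor.py | _stage4_points_grouped_by_topic_in_order
-- ===== SOURCE A (Python) =====
-- from typing import Optional, Dict, List, Any, Callable, Tuple
--
-- def _stage4_points_grouped_by_topic_in_order(
--     points: List[Dict[str, Any]],
-- ) -> List[Tuple[str, List[Dict[str, Any]]]]:
--     """Stable topic order (first-seen); empty/missing topic → single bucket."""
--     order: List[str] = []
--     buckets: Dict[str, List[Dict[str, Any]]] = {}
--     for p in points:
--         key = (p.get("topic") or "").strip() or "(بدون مبحث)"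
--         if key not in buckets:
--             order.append(key)
--             buckets[key] = []
--         buckets[key].append(p)
--     return [(k, buckets[k]) for k in order]
-- ===== SOURCE B (Python) =====
-- from typing import Dict, List, Any, Tuple
--
-- def _stage4_points_grouped_by_topic_in_order(
--     points: List[Dict[str, Any]],
-- ) -> List[Tuple[str, List[Dict[str, Any]]]]:
--     """Stable topic order (first-seen); empty/missing topic -> single bucket."""
--     def key(p):
--         return (p.get("topic") or "").strip() or "(بدون مبحث)"
--     order: List[str] = []
--     for p in points:
--         k = key(p)
--         if k not in order:
--             order.append(k)
--     return [(k, [p for p in points if key(p) == k]) for k in order]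
-- ===== Notes on version B (the rewrite author's own statement) =====
-- stated objective: alternative
-- what changed: B maintains no buckets dict at all: it first computes the first-seen order of distinct keys, then builds each bucket by re-filtering the whole point list per key (two staged passes, O(n*k) nested scan instead of A's single-pass dict accumulation).
import Mathlib
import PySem

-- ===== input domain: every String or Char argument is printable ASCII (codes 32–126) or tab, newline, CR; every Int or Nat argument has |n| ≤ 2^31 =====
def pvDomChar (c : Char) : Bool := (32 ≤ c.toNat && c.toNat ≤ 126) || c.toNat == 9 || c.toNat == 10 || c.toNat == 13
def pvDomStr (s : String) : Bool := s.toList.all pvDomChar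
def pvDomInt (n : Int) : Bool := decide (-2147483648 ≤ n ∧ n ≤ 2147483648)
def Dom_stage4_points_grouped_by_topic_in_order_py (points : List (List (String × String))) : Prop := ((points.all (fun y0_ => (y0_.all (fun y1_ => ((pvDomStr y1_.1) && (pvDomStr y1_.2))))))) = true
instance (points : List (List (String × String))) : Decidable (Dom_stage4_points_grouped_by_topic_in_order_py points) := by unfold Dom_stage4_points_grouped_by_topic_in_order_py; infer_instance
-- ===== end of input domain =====

-- B replaces A's single-pass dict-of-buckets accumulation by two staged passes: first the
-- first-seen order of distinct keys, then one filter pass over all points per key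
-- (objective: alternative algorithm, no dict maintained; same return value).

-- key = (p.get("topic") or "").strip() or "(بدون مبحث)"   — shared key expression of both Pythons.
-- '(x or "")' maps None and "" to ""; stripping "" gives "", so getD "" then strip is exact.
def pvKey (p : List (String × String)) : String :=
  let s := PySem.Str.strip (((PySem.Dict.mk p).get? "topic").getD "")
  if s = "" then "(بدون مبحث)" else s

-- ===== PORT A =====
def stage4_points_grouped_by_topic_in_order_py (points : List (List (String × String))) : List (String × (List (List (String × String)))) :=
  let st := points.foldl
    (fun (st : List String × PySem.Dict String (List (List (String × String)))) p =>
      let key := pvKey p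
      -- if key not in buckets: order.append(key); buckets[key] = []
      let st' := if st.2.contains key then st else (st.1 ++ [key], st.2.insert key [])
      -- buckets[key].append(p)
      (st'.1, st'.2.modify key [] (· ++ [p])))
    ([], PySem.Dict.empty)
  -- [(k, buckets[k]) for k in order]; every k of order is a key of buckets, so buckets[k] never raises
  st.1.map (fun k => (k, st.2.getD k []))

-- ===== PORT B =====
def stage4_points_grouped_by_topic_in_order_py_alt (points : List (List (String × String))) : List (String × (List (List (String × String)))) :=
  -- pass 1: first-seen order of the distinct keys
  let order := points.foldl
    (fun (acc : List String) p =>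
      let k := pvKey p
      if acc.contains k then acc else acc ++ [k]) []
  -- pass 2: [(k, [p for p in points if key(p) == k]) for k in order]
  order.map (fun k => (k, points.filter (fun p => pvKey p == k)))

-- ===== PRECONDITION & SPEC =====
def Spec_stage4_points_grouped_by_topic_in_order_py (points : List (List (String × String))) (out : List (String × (List (List (String × String))))) : Prop := out = stage4_points_grouped_by_topic_in_order_py_alt points
instance (points : List (List (String × String))) (out : List (String × (List (List (String × String))))) : Decidable (Spec_stage4_points_grouped_by_topic_in_order_py points out) := by unfold Spec_stage4_points_grouped_by_topic_in_order_py; infer_instance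

-- ===== CLAIM (what is proved, stated in full; the proofs are below) =====
def Claim_equal_stage4_points_grouped_by_topic_in_order_py : Prop := ∀ (points : List (List (String × String))), Dom_stage4_points_grouped_by_topic_in_order_py points → Spec_stage4_points_grouped_by_topic_in_order_py points (stage4_points_grouped_by_topic_in_order_py points)

-- ===== LEMMAS AND PROOFS =====

-- The dict component of A's fold maps every key k to the points whose key is k, in order.
lemma pv_getD_foldl (points : List (List (String × String))) :
    ∀ (st : List String × PySem.Dict String (List (List (String × String)))) (k : String),
    (points.foldl
      (fun st p =>
        let key := pvKey p
        let st' := if st.2.contains key then st else (st.1 ++ [key], st.2.insert key [])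
        (st'.1, st'.2.modify key [] (· ++ [p]))) st).2.getD k [] =
    st.2.getD k [] ++ points.filter (fun p => pvKey p == k) := by
  induction points with
  | nil => intro st k; simp
  | cons p rest ih =>
    intro st k
    simp only [List.foldl_cons, List.filter_cons]
    rw [ih]
    by_cases hk : pvKey p = k
    · subst hk
      simp only [beq_self_eq_true, if_true]
      by_cases hc : st.2.contains (pvKey p)
      · simp [hc]
      · simp only [Bool.not_eq_true] at hc
        simp [hc, PySem.Dict.getD_of_not_contains (h := hc)]
    · have hbk : (pvKey p == k) = false := by simp [hk]
      simp only [hbk, Bool.false_eq_true, if_false]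
      by_cases hc : st.2.contains (pvKey p)
      · simp [hc, PySem.Dict.getD_modify, Ne.symm hk]
      · simp only [Bool.not_eq_true] at hc
        simp [hc, PySem.Dict.getD_modify, PySem.Dict.getD_insert, Ne.symm hk]

-- The order component of A's fold is B's first-seen dedup fold, as long as keys(dict) = order.
lemma pv_fst_foldl (points : List (List (String × String))) :
    ∀ (st : List String × PySem.Dict String (List (List (String × String)))),
    st.2.keys = st.1 →
    (points.foldl
      (fun st p =>
        let key := pvKey p
        let st' := if st.2.contains key then st else (st.1 ++ [key], st.2.insert key [])
        (st'.1, st'.2.modify key [] (· ++ [p]))) st).1 =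
    points.foldl
      (fun (acc : List String) p =>
        let k := pvKey p
        if acc.contains k then acc else acc ++ [k]) st.1 := by
  induction points with
  | nil => intro st _; rfl
  | cons p rest ih =>
    intro st h
    simp only [List.foldl_cons]
    have hcon : st.2.contains (pvKey p) = st.1.contains (pvKey p) := by
      rw [← h]
      by_cases hm : pvKey p ∈ st.2.keys
      · simp [hm, (PySem.Dict.contains_iff_mem_keys st.2 (pvKey p)).mpr hm]
      · have : st.2.contains (pvKey p) = false := by
          by_contra hc
          exact hm ((PySem.Dict.contains_iff_mem_keys st.2 (pvKey p)).mp (by simpa using hc))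
        simp [this, hm]
    by_cases hc : st.1.contains (pvKey p)
    · rw [hcon]
      simp only [hc, if_true]
      apply ih
      have hc2 : st.2.contains (pvKey p) = true := by rw [hcon]; simpa using hc
      simpa [PySem.Dict.keys_modify, PySem.Dict.keys_insert_of_contains (h := hc2), hc2] using h
    · rw [hcon]
      simp only [hc, Bool.false_eq_true, if_false]
      apply ih
      have hc2 : st.2.contains (pvKey p) = false := by rw [hcon]; simpa using hc
      simp [PySem.Dict.keys_modify, PySem.Dict.insert_insert_self,
            PySem.Dict.keys_insert_of_not_contains (h := hc2), h]

-- ===== VERDICT (by name: the statement is the Claim_ definition above) =====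
theorem stage4_points_grouped_by_topic_in_order_py_spec : Claim_equal_stage4_points_grouped_by_topic_in_order_py := by
  intro points _
  unfold Spec_stage4_points_grouped_by_topic_in_order_py
  unfold stage4_points_grouped_by_topic_in_order_py stage4_points_grouped_by_topic_in_order_py_alt
  simp only
  rw [pv_fst_foldl points ([], PySem.Dict.empty) (by simp)]
  apply List.map_congr_left
  intro k _
  rw [pv_getD_foldl points ([], PySem.Dict.empty) k]
  simp
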